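-- pv_equiv track=rewrite | github.com/QingYun-GitHub/QingYunModLibs | QingYunModLibs/Plugins/MathPlugins/CommonAlgorithms.py | GetClosestRot
-- ===== SOURCE A (Python) =====
-- def GetClosestRot(Rot, CloseRotList):
--     '''
--     用于比较一个角度相对于几个角度中最相近的角度
--
--     :param Rot: 需要取相近值的角度
--     :param CloseRotList: 需要进行比较的角度列表
--     :return: ClosestRot
--     '''
--     DifferenceList = []
--     CloseRotDict = {}
--     for CloseRot in CloseRotList:
--         Difference = GetMustValue(Rot - CloseRot)
--         DifferenceList.append(Difference)
--         CloseRotDict[Difference] = CloseRot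
--     return CloseRotDict[min(DifferenceList)]
--
-- def GetMustValue(Value):
--     '''
--     用于取一个值的绝对值
--
--     :param Value: 需要取绝对值的值
--     :return: MustValue
--     '''
--     if Value > 0: return Value
--     else: return -Value
-- ===== SOURCE B (Python) =====
-- def GetClosestRot(Rot, CloseRotList):
--     best_rot = None
--     best_diff = None
--     for CloseRot in CloseRotList:
--         diff = Rot - CloseRot
--         if diff < 0:
--             diff = -diff
--         if best_diff is None or diff <= best_diff:
--             best_diff = diff
--             best_rot = CloseRot
--     if best_diff is None:
--         raise ValueError("CloseRotList is empty")
--     return best_rot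
-- ===== Notes on version B (the rewrite author's own statement) =====
-- stated objective: simpler
-- what changed: Replaces A's difference list + dict-of-differences (then min() and a dict lookup) with a single loop tracking the best angle and best difference; <= on ties keeps the last angle, matching A's dict overwrite.
import Mathlib
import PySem

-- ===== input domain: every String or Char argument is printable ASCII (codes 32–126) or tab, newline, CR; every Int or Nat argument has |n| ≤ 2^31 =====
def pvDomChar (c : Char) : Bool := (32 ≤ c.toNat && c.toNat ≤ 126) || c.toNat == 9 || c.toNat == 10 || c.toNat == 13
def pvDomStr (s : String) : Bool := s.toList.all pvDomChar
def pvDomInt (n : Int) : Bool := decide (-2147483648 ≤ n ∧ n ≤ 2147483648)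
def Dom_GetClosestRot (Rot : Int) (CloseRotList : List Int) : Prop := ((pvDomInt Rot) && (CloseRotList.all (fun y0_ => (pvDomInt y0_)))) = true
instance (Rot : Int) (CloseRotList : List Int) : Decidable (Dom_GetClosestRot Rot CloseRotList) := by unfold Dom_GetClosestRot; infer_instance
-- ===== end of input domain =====

-- B replaces A's difference list + dict (min() then lookup) with one loop keeping the best angle so far (simpler, O(1) extra space).


-- ===== PORT A =====
-- helper GetMustValue from the same module
def GetMustValue (Value : Int) : Int := if Value > 0 then Value else -Value

def pvStepA (Rot : Int) (p : List Int × PySem.Dict Int Int) (CloseRot : Int) :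
    List Int × PySem.Dict Int Int :=
  let Difference := GetMustValue (Rot - CloseRot)
  (p.1 ++ [Difference], p.2.insert Difference CloseRot)

def GetClosestRot (Rot : Int) (CloseRotList : List Int) : Int :=
  let st := CloseRotList.foldl (pvStepA Rot) ([], PySem.Dict.empty)
  match PySem.List.min? st.1 (fun y => y) with
  | some m => (st.2.get? m).getD 0   -- min([]) / KeyError raise: excluded by Pre_
  | none => 0

-- ===== PORT B =====
def pvStepB (Rot : Int) (acc : Option (Int × Int)) (CloseRot : Int) : Option (Int × Int) :=
  let diff0 := Rot - CloseRot
  let diff := if diff0 < 0 then -diff0 else diff0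
  match acc with
  | none => some (CloseRot, diff)
  | some (br, bd) => if diff ≤ bd then some (CloseRot, diff) else some (br, bd)

def GetClosestRot_alt (Rot : Int) (CloseRotList : List Int) : Int :=
  match CloseRotList.foldl (pvStepB Rot) none with
  | some (br, _) => br
  | none => 0   -- raise ValueError: excluded by Pre_

-- ===== PRECONDITION & SPEC =====
-- Both programs raise on the empty list (A: min([]) is ValueError), so it is excluded.
def Pre_GetClosestRot (Rot : Int) (CloseRotList : List Int) : Prop := CloseRotList ≠ []
instance (Rot : Int) (CloseRotList : List Int) : Decidable (Pre_GetClosestRot Rot CloseRotList) := by unfold Pre_GetClosestRot; infer_instance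
def pvWitness_GetClosestRot : Int × List Int := (90, [0, 80, 100])

def Spec_GetClosestRot (Rot : Int) (CloseRotList : List Int) (out : Int) : Prop := out = GetClosestRot_alt Rot CloseRotList
instance (Rot : Int) (CloseRotList : List Int) (out : Int) : Decidable (Spec_GetClosestRot Rot CloseRotList out) := by unfold Spec_GetClosestRot; infer_instance

-- ===== CLAIM (what is proved, stated in full; the proofs are below) =====
def Claim_equal_GetClosestRot : Prop := ∀ (Rot : Int) (CloseRotList : List Int), Dom_GetClosestRot Rot CloseRotList → Pre_GetClosestRot Rot CloseRotList → Spec_GetClosestRot Rot CloseRotList (GetClosestRot Rot CloseRotList)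

-- ===== LEMMAS AND PROOFS =====
theorem pvStepB_none (Rot c : Int) :
    pvStepB Rot none c = some (c, GetMustValue (Rot - c)) := by
  simp only [pvStepB, GetMustValue]
  split_ifs <;> simp <;> omega

theorem pvStepB_some (Rot c br bd : Int) :
    pvStepB Rot (some (br, bd)) c =
      if GetMustValue (Rot - c) ≤ bd then some (c, GetMustValue (Rot - c)) else some (br, bd) := by
  simp only [pvStepB, GetMustValue]
  split_ifs <;> simp <;> omega

theorem pvMin_append (l : List Int) (a m : Int)
    (h : PySem.List.min? l (fun y => y) = some m) :
    PySem.List.min? (l ++ [a]) (fun y => y) = some (min m a) := by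
  cases l with
  | nil => simp [PySem.List.min?] at h
  | cons x t =>
    rw [PySem.List.min?_id_cons] at h
    injection h with h
    rw [List.cons_append, PySem.List.min?_id_cons, List.foldl_append]
    simp [h]

-- loop invariant: B's running (best_rot, best_diff) is A's dict lookup at the running minimum difference
theorem pvInv (Rot : Int) (xs : List Int) (hx : xs ≠ []) :
    ∃ br bd, xs.foldl (pvStepB Rot) none = some (br, bd) ∧
      PySem.List.min? (xs.foldl (pvStepA Rot) ([], PySem.Dict.empty)).1 (fun y => y) = some bd ∧
      ((xs.foldl (pvStepA Rot) ([], PySem.Dict.empty)).2.get? bd) = some br := by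
  induction xs using List.reverseRecOn with
  | nil => exact absurd rfl hx
  | append_singleton ys x ih =>
    by_cases hys : ys = []
    · subst hys
      refine ⟨x, GetMustValue (Rot - x), ?_, ?_, ?_⟩
      · simp [pvStepB_none]
      · simp [pvStepA, PySem.List.min?_id_cons]
      · simp [pvStepA, PySem.Dict.get?_insert_self]
    · obtain ⟨br, bd, hB, hMin, hGet⟩ := ih hys
      rw [List.foldl_append, List.foldl_append, hB]
      rw [List.foldl_cons, List.foldl_nil, pvStepB_some]
      have hMin' := pvMin_append (ys.foldl (pvStepA Rot) ([], PySem.Dict.empty)).1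
        (GetMustValue (Rot - x)) bd hMin
      by_cases hle : GetMustValue (Rot - x) ≤ bd
      · refine ⟨x, GetMustValue (Rot - x), ?_, ?_, ?_⟩
        · rw [if_pos hle]
        · have : min bd (GetMustValue (Rot - x)) = GetMustValue (Rot - x) := by omega
          rw [this] at hMin'
          simpa [pvStepA] using hMin'
        · simp only [List.foldl_cons, List.foldl_nil, pvStepA]
          exact PySem.Dict.get?_insert_self _ _ _
      · refine ⟨br, bd, ?_, ?_, ?_⟩
        · rw [if_neg hle]
        · have : min bd (GetMustValue (Rot - x)) = bd := by omega
          rw [this] at hMin'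
          simpa [pvStepA] using hMin'
        · have hne : bd ≠ GetMustValue (Rot - x) := by omega
          simp only [List.foldl_cons, List.foldl_nil, pvStepA]
          rw [PySem.Dict.get?_insert_of_ne _ _ hne]
          exact hGet

-- ===== VERDICT (by name: the statement is the Claim_ definition above) =====
theorem GetClosestRot_spec : Claim_equal_GetClosestRot := by
  intro Rot xs _ hpre
  obtain ⟨br, bd, hB, hMin, hGet⟩ := pvInv Rot xs hpre
  simp only [Spec_GetClosestRot, GetClosestRot, GetClosestRot_alt, hB, hMin, hGet, Option.getD_some]
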